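-- pv_equiv track=rewrite | github.com/joesatow/realtor.com | helper_funcs/createImageGrid.py | rearrangeFileList
-- ===== SOURCE A (Python) =====
-- def rearrangeFileList(fileList):
--     newList = [None] * 4
--     for filename in fileList:
--         if "1w" in filename:
--             newList[0] = filename
--         if "1d" in filename:
--             newList[1] = filename
--         if "4h" in filename:
--             newList[2] = filename
--         if "1h" in filename:
--             newList[3] = filename
--     return newList
-- ===== SOURCE B (Python) =====
-- def rearrangeFileList(fileList):
--     return [next((f for f in reversed(fileList) if pat in f), None)
--             for pat in ["1w", "1d", "4h", "1h"]]
-- ===== Notes on version B (the rewrite author's own statement) =====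
-- stated objective: simpler
-- what changed: Replaces the single overwrite pass mutating a 4-slot list with an independent per-pattern search over the reversed list (last match wins), expressed as one comprehension.
import Mathlib
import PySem

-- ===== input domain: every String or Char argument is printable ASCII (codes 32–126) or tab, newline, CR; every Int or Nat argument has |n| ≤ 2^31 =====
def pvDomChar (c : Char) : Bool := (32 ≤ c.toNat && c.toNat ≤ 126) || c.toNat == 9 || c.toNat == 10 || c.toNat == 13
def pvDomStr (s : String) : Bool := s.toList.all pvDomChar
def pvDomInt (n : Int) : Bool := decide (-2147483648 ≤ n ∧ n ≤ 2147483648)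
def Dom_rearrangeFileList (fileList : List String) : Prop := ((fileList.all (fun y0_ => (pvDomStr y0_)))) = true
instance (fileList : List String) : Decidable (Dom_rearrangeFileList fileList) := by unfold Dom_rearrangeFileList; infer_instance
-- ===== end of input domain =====

-- ===== PORT A =====
-- Literal port of A: [None]*4, then one pass that overwrites the matching slots.
def pvStepA (newList : List (Option String)) (filename : String) : List (Option String) :=
  let newList := if PySem.Str.isIn "1w" filename then newList.set 0 (some filename) else newList
  let newList := if PySem.Str.isIn "1d" filename then newList.set 1 (some filename) else newList
  let newList := if PySem.Str.isIn "4h" filename then newList.set 2 (some filename) else newList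
  let newList := if PySem.Str.isIn "1h" filename then newList.set 3 (some filename) else newList
  newList

def rearrangeFileList (fileList : List String) : List (Option String) :=
  fileList.foldl pvStepA [none, none, none, none]

-- ===== PORT B =====
-- B: each slot found independently — first match in the reversed list.
def pvFindRev (pat : String) (fileList : List String) : Option String :=
  fileList.reverse.find? (fun f => PySem.Str.isIn pat f)

def rearrangeFileList_alt (fileList : List String) : List (Option String) :=
  (["1w", "1d", "4h", "1h"]).map (fun pat => pvFindRev pat fileList)

-- ===== PRECONDITION & SPEC =====
def Spec_rearrangeFileList (fileList : List String) (out : List (Option String)) : Prop := out = rearrangeFileList_alt fileList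
instance (fileList : List String) (out : List (Option String)) : Decidable (Spec_rearrangeFileList fileList out) := by unfold Spec_rearrangeFileList; infer_instance

-- ===== CLAIM (what is proved, stated in full; the proofs are below) =====
def Claim_equal_rearrangeFileList : Prop := ∀ (fileList : List String), Dom_rearrangeFileList fileList → Spec_rearrangeFileList fileList (rearrangeFileList fileList)

-- ===== LEMMAS AND PROOFS =====
theorem pvFindRev_append (pat : String) (fl : List String) (x : String) :
    pvFindRev pat (fl ++ [x]) =
      if PySem.Str.isIn pat x then some x else pvFindRev pat fl := by
  simp [pvFindRev, List.find?]
  split <;> simp_all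

theorem rearrangeFileList_eq_alt (fileList : List String) :
    rearrangeFileList fileList = rearrangeFileList_alt fileList := by
  induction fileList using List.reverseRecOn with
  | nil => rfl
  | append_singleton fl x ih =>
      have hA : rearrangeFileList (fl ++ [x]) = pvStepA (rearrangeFileList fl) x := by
        simp [rearrangeFileList]
      rw [hA, ih]
      simp only [rearrangeFileList_alt, List.map, pvFindRev_append, pvStepA]
      split_ifs <;> simp

-- ===== VERDICT (by name: the statement is the Claim_ definition above) =====
theorem rearrangeFileList_spec : Claim_equal_rearrangeFileList := by
  intro fileList _
  unfold Spec_rearrangeFileList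
  exact rearrangeFileList_eq_alt fileList
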